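-- pv_equiv track=rewrite | github.com/dotzo/AdventOfCode2020 | AdventOfCode2020/Day-17.py | min_dim_4D
-- ===== SOURCE A (Python) =====
-- def min_dim_4D(space):
--     mx, my, mz, mw = 0, 0, 0, 0
--     for (x,y,z,w), v in space.items():
--         if v == '.':
--             continue
--         if x < mx:
--             mx = x
--         if y < my:
--             my = y
--         if z < mz:
--             mz = z
--         if w < mw:
--             mw = w
--
--     return mx, my, mz, mw
-- ===== SOURCE B (Python) =====
-- def min_dim_4D(space):
--     pts = [c for c, v in space.items() if v != '.']
--
--     def rec(lo, hi):
--         # componentwise min, floored at 0, of pts[lo:hi] by divide and conquer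
--         if hi - lo == 0:
--             return (0, 0, 0, 0)
--         if hi - lo == 1:
--             x, y, z, w = pts[lo]
--             return (min(x, 0), min(y, 0), min(z, 0), min(w, 0))
--         mid = (lo + hi) // 2
--         a = rec(lo, mid)
--         b = rec(mid, hi)
--         return (min(a[0], b[0]), min(a[1], b[1]), min(a[2], b[2]), min(a[3], b[3]))
--
--     return rec(0, len(pts))
-- ===== Notes on version B (the rewrite author's own statement) =====
-- stated objective: alternative
-- what changed: Replaces A's single linear pass with four running minima by a divide-and-conquer recursion over the filtered active coordinates: split in halves, recurse, and merge componentwise minima, with the empty base case of all zeros supplying the 0-floor.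
import Mathlib
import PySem

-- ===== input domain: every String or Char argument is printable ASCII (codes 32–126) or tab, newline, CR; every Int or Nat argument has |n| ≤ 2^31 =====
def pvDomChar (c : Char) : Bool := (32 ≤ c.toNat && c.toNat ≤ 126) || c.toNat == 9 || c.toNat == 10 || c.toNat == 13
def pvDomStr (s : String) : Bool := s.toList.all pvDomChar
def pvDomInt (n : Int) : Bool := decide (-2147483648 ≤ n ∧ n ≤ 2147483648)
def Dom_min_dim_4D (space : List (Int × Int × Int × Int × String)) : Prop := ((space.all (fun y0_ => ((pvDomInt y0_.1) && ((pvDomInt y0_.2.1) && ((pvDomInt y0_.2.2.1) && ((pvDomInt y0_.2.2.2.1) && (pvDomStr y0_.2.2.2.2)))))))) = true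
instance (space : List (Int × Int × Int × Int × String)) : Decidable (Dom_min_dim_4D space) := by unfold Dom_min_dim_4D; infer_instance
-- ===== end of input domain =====

-- B replaces A's single four-accumulator pass by a divide-and-conquer recursion over the
-- filtered active coordinates (objective: alternative decomposition, same O(n) work).

-- ===== PORT A =====
def minDimStep (m : Int × Int × Int × Int) (e : Int × Int × Int × Int × String) : Int × Int × Int × Int :=
  if e.2.2.2.2 == "." then m
  else
    let mx := if e.1 < m.1 then e.1 else m.1
    let my := if e.2.1 < m.2.1 then e.2.1 else m.2.1
    let mz := if e.2.2.1 < m.2.2.1 then e.2.2.1 else m.2.2.1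
    let mw := if e.2.2.2.1 < m.2.2.2 then e.2.2.2.1 else m.2.2.2
    (mx, my, mz, mw)

def min_dim_4D (space : List (Int × Int × Int × Int × String)) : Int × Int × Int × Int :=
  space.foldl minDimStep (0, 0, 0, 0)

-- ===== PORT B =====
-- divide and conquer: componentwise min floored at 0, halving the list of active points
def minDimDC : List (Int × Int × Int × Int) → Int × Int × Int × Int
  | [] => (0, 0, 0, 0)
  | [p] => (min p.1 0, min p.2.1 0, min p.2.2.1 0, min p.2.2.2 0)
  | p :: q :: t =>
      let a := minDimDC ((p :: q :: t).take ((p :: q :: t).length / 2))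
      let b := minDimDC ((p :: q :: t).drop ((p :: q :: t).length / 2))
      (min a.1 b.1, min a.2.1 b.2.1, min a.2.2.1 b.2.2.1, min a.2.2.2 b.2.2.2)
termination_by l => l.length
decreasing_by
  · simp [List.length_take]; omega
  · simp; omega

def min_dim_4D_alt (space : List (Int × Int × Int × Int × String)) : Int × Int × Int × Int :=
  minDimDC ((space.filter (fun e => !(e.2.2.2.2 == "."))).map (fun e => (e.1, e.2.1, e.2.2.1, e.2.2.2.1)))

-- ===== PRECONDITION & SPEC =====
def Spec_min_dim_4D (space : List (Int × Int × Int × Int × String)) (out : Int × Int × Int × Int) : Prop := out = min_dim_4D_alt space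
instance (space : List (Int × Int × Int × Int × String)) (out : Int × Int × Int × Int) : Decidable (Spec_min_dim_4D space out) := by unfold Spec_min_dim_4D; infer_instance

-- ===== CLAIM =====
def Claim_equal_min_dim_4D : Prop := ∀ (space : List (Int × Int × Int × Int × String)), Dom_min_dim_4D space → Spec_min_dim_4D space (min_dim_4D space)

-- ===== LEMMAS AND PROOFS =====

theorem foldl_min_pull (t : List Int) (x y : Int) :
    t.foldl min (min x y) = min x (t.foldl min y) := by
  induction t generalizing y with
  | nil => simp
  | cons c t ih => simp only [List.foldl_cons, min_assoc, ih]

theorem foldl_min_nonpos (t : List Int) : t.foldl min 0 ≤ 0 := by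
  induction t with
  | nil => simp
  | cons c t ih =>
      simp only [List.foldl_cons]
      calc t.foldl min (min 0 c) = min 0 (t.foldl min c) := foldl_min_pull t 0 c
        _ ≤ 0 := min_le_left _ _

theorem foldl_min_split (a b : List Int) :
    (a ++ b).foldl min 0 = min (a.foldl min 0) (b.foldl min 0) := by
  have h : min (a.foldl min 0) 0 = a.foldl min 0 := min_eq_left (foldl_min_nonpos a)
  calc (a ++ b).foldl min 0 = b.foldl min (a.foldl min 0) := List.foldl_append ..
    _ = b.foldl min (min (a.foldl min 0) 0) := by rw [h]
    _ = min (a.foldl min 0) (b.foldl min 0) := foldl_min_pull b _ 0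

theorem minDimDC_spec (l : List (Int × Int × Int × Int)) :
    minDimDC l = ((l.map (·.1)).foldl min 0, (l.map (·.2.1)).foldl min 0,
                  (l.map (·.2.2.1)).foldl min 0, (l.map (·.2.2.2)).foldl min 0) := by
  fun_induction minDimDC l with
  | case1 => simp
  | case2 p =>
      simp only [List.map_cons, List.map_nil, List.foldl_cons, List.foldl_nil]
      rw [min_comm 0 p.1, min_comm 0 p.2.1, min_comm 0 p.2.2.1, min_comm 0 p.2.2.2]
  | case3 p q t a b ih1 ih2 =>
      have hsplit : ∀ (f : Int × Int × Int × Int → Int),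
          ((p :: q :: t).map f).foldl min 0 =
            min ((((p :: q :: t).take ((p :: q :: t).length / 2)).map f).foldl min 0)
                ((((p :: q :: t).drop ((p :: q :: t).length / 2)).map f).foldl min 0) := by
        intro f
        conv_rhs => rw [List.map_take, List.map_drop, ← foldl_min_split, List.take_append_drop]
      simp only [a, b, ih1, ih2]
      rw [hsplit (·.1), hsplit (·.2.1), hsplit (·.2.2.1), hsplit (·.2.2.2)]

theorem step_min (a x : Int) : (if x < a then x else a) = min a x := by
  rw [min_def]; split_ifs <;> omega

theorem foldA_char (l : List (Int × Int × Int × Int × String)) (a b c d : Int) :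
    l.foldl minDimStep (a, b, c, d) =
      (((l.filter (fun e => !(e.2.2.2.2 == "."))).map (fun e => e.1)).foldl min a,
       ((l.filter (fun e => !(e.2.2.2.2 == "."))).map (fun e => e.2.1)).foldl min b,
       ((l.filter (fun e => !(e.2.2.2.2 == "."))).map (fun e => e.2.2.1)).foldl min c,
       ((l.filter (fun e => !(e.2.2.2.2 == "."))).map (fun e => e.2.2.2.1)).foldl min d) := by
  induction l generalizing a b c d with
  | nil => simp
  | cons e t ih =>
      simp only [List.foldl_cons, minDimStep]
      by_cases h : e.2.2.2.2 == "."
      · simp [h, ih]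
      · simp [h, ih, step_min]

-- ===== VERDICT =====
theorem min_dim_4D_spec : Claim_equal_min_dim_4D := by
  intro space _
  unfold Spec_min_dim_4D min_dim_4D min_dim_4D_alt
  rw [foldA_char, minDimDC_spec]
  simp [List.map_map, Function.comp_def]
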